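-- pv_equiv track=rewrite | github.com/apolpae/sample.numbers | sample_numbers/node.py | __equation_to_string
-- ===== SOURCE A (Python) =====
-- def __equation_to_string(equation: list):
--     string_equation = ''
--
--     for value in equation:
--         if (value >= 0) and (string_equation):
--             string_equation += '+' + str(value)
--         else:
--             string_equation += str(value)
--
--     return string_equation
-- ===== SOURCE B (Python) =====
-- def __equation_to_string(equation: list):
--     if not equation:
--         return ''
--     head, *tail = equation
--     return str(head) + ''.join('%+d' % value for value in tail)
-- ===== Notes on version B (the rewrite author's own statement) =====
-- stated objective: simpler
-- what changed: Replaces A's stateful loop with its per-iteration sign-and-emptiness test by a head/tail decomposition: the head is printed unsigned, and the tail is rendered branch-free with printf-style '%+d' signed formatting and joined.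
import Mathlib
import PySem

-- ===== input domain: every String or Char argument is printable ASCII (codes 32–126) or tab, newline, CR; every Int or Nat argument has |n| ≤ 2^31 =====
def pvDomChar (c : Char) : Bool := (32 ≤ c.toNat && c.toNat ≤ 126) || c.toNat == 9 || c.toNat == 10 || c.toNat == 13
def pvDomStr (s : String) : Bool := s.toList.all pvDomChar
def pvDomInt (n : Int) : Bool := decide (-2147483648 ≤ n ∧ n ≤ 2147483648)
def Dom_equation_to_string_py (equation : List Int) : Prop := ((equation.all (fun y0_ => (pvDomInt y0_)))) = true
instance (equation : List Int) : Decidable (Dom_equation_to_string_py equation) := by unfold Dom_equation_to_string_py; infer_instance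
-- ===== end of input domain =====

-- B splits off the head (printed unsigned) and renders the tail branch-free with
-- printf-style '%+d' signed formatting, joined — no accumulator-emptiness test
-- (objective: simpler).

-- ===== PORT A =====
def equation_to_string_py (equation : List Int) : String :=
  equation.foldl
    (fun string_equation value =>
      if 0 ≤ value ∧ string_equation ≠ "" then
        string_equation ++ ("+" ++ PySem.Int.toStr value)
      else
        string_equation ++ PySem.Int.toStr value)
    ""

-- ===== PORT B =====
-- exact port of Python's "'%+d' % v" for an int: '+' before str(v) when v >= 0, str(v) otherwise
def pvFmtPlusD (v : Int) : String :=
  if 0 ≤ v then "+" ++ PySem.Int.toStr v else PySem.Int.toStr v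

def equation_to_string_py_alt (equation : List Int) : String :=
  match equation with
  | [] => ""
  | head :: tail => PySem.Int.toStr head ++ PySem.Str.join "" (tail.map pvFmtPlusD)

-- ===== PRECONDITION & SPEC =====
def Spec_equation_to_string_py (equation : List Int) (out : String) : Prop := out = equation_to_string_py_alt equation
instance (equation : List Int) (out : String) : Decidable (Spec_equation_to_string_py equation out) := by unfold Spec_equation_to_string_py; infer_instance

-- ===== CLAIM =====
def Claim_equal_equation_to_string_py : Prop := ∀ (equation : List Int), Dom_equation_to_string_py equation → Spec_equation_to_string_py equation (equation_to_string_py equation)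

-- ===== LEMMAS AND PROOFS =====

-- char-level token B emits for one tail value
def pvTok (v : Int) : List Char :=
  if 0 ≤ v then '+' :: PySem.Int.toChars v else PySem.Int.toChars v

theorem pv_toDigitsCore_ne_nil (b : Nat) :
    ∀ (f n : Nat) (acc : List Char), 0 < f ∨ acc ≠ [] → Nat.toDigitsCore b f n acc ≠ [] := by
  intro f
  induction f with
  | zero =>
    intro n acc h
    simpa [Nat.toDigitsCore] using h.resolve_left (by omega)
  | succ f ih =>
    intro n acc _
    simp only [Nat.toDigitsCore]
    split
    · simp
    · exact ih _ _ (Or.inr (by simp))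

theorem pv_toChars_ne_nil (n : Int) : PySem.Int.toChars n ≠ [] := by
  unfold PySem.Int.toChars
  split
  · simp
  · exact pv_toDigitsCore_ne_nil 10 _ _ [] (Or.inl (by omega))

-- A's fold from a nonempty accumulator appends exactly the signed tokens
theorem pv_foldA_nonempty (eq : List Int) :
    ∀ (s : String), s.toList ≠ [] →
      (eq.foldl
        (fun string_equation value =>
          if 0 ≤ value ∧ string_equation ≠ "" then
            string_equation ++ ("+" ++ PySem.Int.toStr value)
          else
            string_equation ++ PySem.Int.toStr value)
        s).toList = s.toList ++ (eq.map pvTok).flatten := by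
  induction eq with
  | nil => intro s _; simp
  | cons v t ih =>
    intro s hs
    have hs' : s ≠ "" := by
      intro h; apply hs; rw [h]; rfl
    by_cases hv : 0 ≤ v
    · have h1 : (s ++ ("+" ++ PySem.Int.toStr v)).toList
          = s.toList ++ ('+' :: PySem.Int.toChars v) := by
        simp [PySem.Int.toList_toStr]
      simp only [List.foldl_cons, if_pos (And.intro hv hs')]
      rw [ih _ (by rw [h1]; simp), h1]
      simp [pvTok, hv]
    · have h1 : (s ++ PySem.Int.toStr v).toList
          = s.toList ++ PySem.Int.toChars v := by
        simp [PySem.Int.toList_toStr]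
      simp only [List.foldl_cons, if_neg (by tauto : ¬ (0 ≤ v ∧ s ≠ ""))]
      rw [ih _ (by rw [h1]; simp [pv_toChars_ne_nil]), h1]
      simp [pvTok, hv]

theorem pv_join_nil_eq_flatten (ts : List (List Char)) :
    PySem.Chars.join [] ts = ts.flatten := by
  induction ts with
  | nil => simp [PySem.Chars.join_nil]
  | cons t ts ih =>
    cases ts with
    | nil => simp [PySem.Chars.join_singleton]
    | cons u us => simp [PySem.Chars.join_cons_cons, ih]

-- B's joined tail is the concatenation of the signed tokens
theorem pv_joinB (t : List Int) :
    (PySem.Str.join "" (t.map pvFmtPlusD)).toList = (t.map pvTok).flatten := by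
  have h0 : ("" : String).toList = [] := rfl
  rw [PySem.Str.toList_join, h0, pv_join_nil_eq_flatten]
  congr 1
  simp only [List.map_map]
  refine List.map_congr_left (fun v _ => ?_)
  by_cases hv : 0 ≤ v <;> simp [pvTok, pvFmtPlusD, hv, PySem.Int.toList_toStr]

-- ===== VERDICT =====
theorem equation_to_string_py_spec : Claim_equal_equation_to_string_py := by
  intro equation _
  unfold Spec_equation_to_string_py
  apply String.toList_inj.mp
  cases equation with
  | nil => decide
  | cons v t =>
    have hA : ((v :: t).foldl
        (fun string_equation value =>
          if 0 ≤ value ∧ string_equation ≠ "" then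
            string_equation ++ ("+" ++ PySem.Int.toStr value)
          else
            string_equation ++ PySem.Int.toStr value) "").toList
        = PySem.Int.toChars v ++ (t.map pvTok).flatten := by
      simp only [List.foldl_cons, if_neg (by simp : ¬ (0 ≤ v ∧ ("" : String) ≠ ""))]
      rw [pv_foldA_nonempty t _ (by simp [PySem.Int.toList_toStr, pv_toChars_ne_nil])]
      simp [PySem.Int.toList_toStr]
    unfold equation_to_string_py equation_to_string_py_alt
    rw [hA]
    simp only [String.toList_append, PySem.Int.toList_toStr, pv_joinB]
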